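/- GENERATED by mk_final_copies.py from the proof of the farm's unit `start_decoder.R18` (farm:start_decoder.R18.2: Lemmas.lean) as the
   re-elaboration sweep compiled it — do not edit. -/
import Asan.CheckWalk
import Vorbis.Spec.StartDecoderBTest
import Vorbis.Spec.StartDecoderMid
import Vorbis.Spec.Units.start_decoder_R18
open X86 X86.User Asan Vorbis Vorbis.Spec Vorbis.Spec.StartDecoder

set_option maxRecDepth 4000
set_option maxHeartbeats 4000000
namespace Vorbis.Spec.start_decoder_R18

/-- What every intermediate cut of the segment knows about the state `s` relative to the segment's entry state `v`:
the registers the exit assertion speaks of are those of `v`, the memory is `v`'s but for the return-address slot of the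
last check call (`[R − 8]`, below the stack pointer). -/
structure St (u₀ : State) (g : Ghost) (v s : State) (pc : Word) : Prop where
  rip : s.rip = pc
  rsp : s.reg .rsp = g.e.reg .rsp - 1480
  rbp : s.reg .rbp = g.e.reg .rdi
  r13 : s.reg .r13 = v.reg .r13
  r15 : s.reg .r15 = v.reg .r15
  mem : ∃ x, s.mem = v.mem.writeLE (g.e.reg .rsp - 1488) 8 x
  code : Mem.EqOn Vorbis.L.textLo Vorbis.L.textHi u₀.mem s.mem
  df : s.flags .df = false
  mx : s.mxcsr &&& 0x1F80 = 0x1F80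

/-- The pure facts the walks need, all about the segment's entry state `v` (from `BodyR18`: `facts_of`). `r` is the record
`residue_config + 32·i`. -/
structure Facts (g : Ghost) (i : Nat) (v : State) : Prop where
  i64 : i < 64
  b1le : bsize v.mem g.f 1 ≤ 8192
  fwhere : 0x119d40 ≤ (g.e.reg .rdi).toNat ∧ (g.e.reg .rdi).toNat + 1808 ≤ 0xC00000 ∧
    ((g.e.reg .rsp).toNat + 8 ≤ (g.e.reg .rdi).toNat ∨ (g.e.reg .rdi).toNat + 1808 ≤ 0x700000 ∨
      0x800000 ≤ (g.e.reg .rdi).toNat)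
  rwhere : 0x100000 ≤ stb_vorbis.residue_config_at v.mem g.f i ∧ stb_vorbis.residue_config_at v.mem g.f i + 32 ≤ 0xC00000 ∧
    (stb_vorbis.residue_config_at v.mem g.f i + 32 ≤ 0x700000 ∨ 0x800000 ≤ stb_vorbis.residue_config_at v.mem g.f i)
  r4 : Residue.begin v.mem (stb_vorbis.residue_config_at v.mem g.f i) ≤ Residue.end_ v.mem (stb_vorbis.residue_config_at v.mem g.f i)
  r5 : 1 ≤ Residue.part_size v.mem (stb_vorbis.residue_config_at v.mem g.f i)
  est_le : maxPartRead v.mem g.f i ≤ bsize v.mem g.f 1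
  rd_cnt : v.mem.readLE (g.e.reg .rsp - 1444) 4 = i
  rd_est : v.mem.readLE (g.e.reg .rsp - 1464) 4 = maxPartRead v.mem g.f i
  r15 : (v.reg .r15).toNat = bsize v.mem g.f 1

/-- An 8-byte load at a word whose value is the number `a`, as the typed read. -/
theorem rd64 (mem : Mem) (w : Word) (a : Nat) (h : w.toNat = a) : mem.readLE w 8 = mem.u64 a := by
  rw [eq_addr w a h]
  exact Mem.readLE_addr8 mem a

/-- A 4-byte load at a word whose value is the number `a`, as the typed read. -/
theorem rd32 (mem : Mem) (w : Word) (a : Nat) (h : w.toNat = a) : mem.readLE w 4 = mem.u32 a := by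
  rw [eq_addr w a h]
  exact Mem.readLE_addr4 mem a

/-- A 2-byte load at a word whose value is the number `a`, as the typed read. -/
theorem rd16 (mem : Mem) (w : Word) (a : Nat) (h : w.toNat = a) : mem.readLE w 2 = mem.u16 a := by
  rw [eq_addr w a h]
  exact Mem.readLE_addr2 mem a

/-- `cdq` makes `edx:eax` the sign extension of `eax`. -/
theorem sext_bit (lo : BitVec 32) :
    (if lo.msb = true then BitVec.allOnes 32 else 0) ++ lo = lo.signExtend (32 + 32) := by
  bv_decide

/-- `cdq ; idiv ecx` with `ecx = 2` never faults: the quotient and remainder of the signed division by 2. -/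
theorem idiv2 (lo : BitVec 32) :
    Alu.div true (if lo.msb = true then BitVec.allOnes 32 else 0) lo 2#32 = some (lo.sdiv 2#32, lo.srem 2#32) :=
  Alu.div_signed_narrow _ _ _ (sext_bit lo) (by decide) (fun h => absurd h.2 (by decide))

/-- The signed quotient by 2 of a small non-negative value is the unsigned one. -/
theorem sdiv2_eq (lo : BitVec 32) (h : lo ≤ 8192#32) : lo.sdiv 2#32 = lo / 2#32 := by
  bv_decide

/-- `blocksize_1 / 2` as the machine computes it. -/
theorem sdiv2 (lo : BitVec 32) (h : lo.toNat ≤ 8192) : (lo.sdiv 2#32).toNat = lo.toNat / 2 := by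
  have h' : lo ≤ 8192#32 := by
    rw [BitVec.le_def]
    exact h
  rw [sdiv2_eq lo h', BitVec.toNat_udiv]
  rfl

/-- The loop counter `i < 64`, sign-extended from its 32-bit slot, is `i`. -/
theorem sext_i (i : Nat) (h : i < 64) : (Word.ofBV (BitVec.signExtend 64 (BitVec.ofNat 32 i))).toNat = i := by
  have e : (BitVec.ofNat 32 i).toNat = i := toNat_ofNat32 i (by omega)
  rw [toNat_sext32 _ (by omega), e]

/-- **Where `*f` is**: inside the data space; a stack object of a CALLER's frame (above the return-address slot) or off the stack —
never in start_decoder's own spill area. From `hand.obj` (one live object of the callers' frames or of `others`), `frame.callers`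
and the shadow layer. -/
theorem f_where {u₀ : State} {g : Ghost} {pc : Word} {A : Arena × List Obj} {v : State} (hfr : Frame u₀ g pc A v)
    (hh : g.Hand A) :
    0x119d40 ≤ g.f ∧ g.f + 1808 ≤ 0xC00000 ∧ (g.RA + 8 ≤ g.f ∨ g.f + 1808 ≤ 0x700000 ∨ 0x800000 ≤ g.f) := by
  have hobj := hh.obj
  have hw := (hobj.mono (frames'_sub g A.2)).where_ hfr.shadow hfr.offText (by simp only [voff]; omega)
  simp only [voff] at hw
  obtain ⟨h1, h2, _⟩ := hw
  refine ⟨h1, h2, ?_⟩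
  obtain ⟨o, ho, k1, k2⟩ := hobj
  simp only [voff] at k2
  rcases List.mem_append.mp ho with hs | hoth
  · -- a stack object of a caller's frame
    unfold stackObjs at hs
    obtain ⟨bF, hbF, hin⟩ := List.mem_flatMap.mp hs
    have hbF' : bF ∈ g.frames' := List.mem_cons_of_mem _ hbF
    obtain ⟨a1, a2, _, _, _⟩ := hfr.shadow.stack.active bF hbF'
    obtain ⟨g1, _⟩ := FrameLayout.objsAt_gran a1 a2 hin
    have hc := hfr.callers bF hbF
    have e1 : o.gLo = o.base / 8 := rfl
    left
    omega
  · -- an object of `others`: off the stack region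
    have hoff := hfr.shadow.off o hoth
    unfold OffStack at hoff
    omega

/-- The pure facts of the walks, from the entry assertion. -/
theorem facts_of {u₀ : State} {g : Ghost} {i : Nat} {v : State} {A9 A10 : Arena} {A : Arena × List Obj}
    (hb : BodyR18 u₀ g i A9 A10 A v) : Facts g i v := by
  have hl := hb.loop
  have hfr := hl.frame
  have hlate := hl.late
  have hres := hlate.own.cfg.residue (by omega)
  obtain ⟨hRA8, hroom, htop⟩ := hfr.ra
  obtain ⟨hRR, hR8⟩ := hfr.r_eq
  simp only [depth, steady] at hroom hRR
  have hRAdef : g.RA = (g.e.reg .rsp).toNat := rfl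
  have hfdef : g.f = (g.e.reg .rdi).toNat := rfl
  have hi64 := hres.index_lt i hb.lt
  have hb1 : bsize v.mem g.f 1 ≤ 8192 := by
    have h3 := (HD3.range hlate.header.HD3).2.2
    rw [bsize_one]
    omega
  refine ⟨hi64, hb1, ?_, ?_, (hres.R4 i hb.lt).1, (hres.R5 i hb.lt).1, maxPartRead_le _ _ _, ?_, ?_, ?_⟩
  · have hw := f_where hfr hl.hand
    rw [hRAdef, hfdef] at hw
    exact hw
  · -- the record lies inside the block of R2: in the data space, off the stack
    have hB : A.1.Blk ⟨stb_vorbis.residue_config v.mem g.f, Off.sizeof.Residue * (stb_vorbis.residue_count v.mem g.f).toNat⟩ :=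
      hlate.own.up9 _ hres.R2
    have hin := hlate.env.ok.inside _ (runBlk_setup hB : g.Blk A _)
    have hoff := hlate.arena.blk_off_stack hB
    have hlt := hb.lt
    have hrdef : stb_vorbis.residue_config_at v.mem g.f i = stb_vorbis.residue_config v.mem g.f + 32 * i := rfl
    simp only [voff] at hin hoff
    rw [hrdef]
    omega
  · rw [rd32 v.mem _ (g.R + 0x24) (by u_omega)]
    exact hl.cnt
  · rw [rd32 v.mem _ (g.R + 0x10) (by u_omega)]
    exact hl.est
  · rw [hl.r15, toNat_addr _ (by omega)]

/-- **The pure fact at the exit** (proved below: `exit_ok`): the exit assertion `AtR17 (i + 1)` from the entry assertion `BodyR18`,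
for a state whose registers are those of the entry and whose memory differs by three stores into start_decoder's own spill area
(the return-address slot of the last check `[R − 8]`, the counter `[R + 24H] := i + 1`, `max_part_read` `[R + 10H]`). The walks
below take it as a hypothesis, so that they do not depend on the frame layer. -/
def ExitOK (u₀ : State) : Prop :=
  ∀ (g : Ghost) (i : Nat) (v : State) (A9 A10 : Arena) (A : Arena × List Obj), BodyR18 u₀ g i A9 A10 A v →
    ∀ (s : State) (x c m : Nat), s.rip = Vorbis.L.start_decoder.cut277 → s.reg .rsp = g.e.reg .rsp - 1480 →
      s.reg .rbp = g.e.reg .rdi → s.reg .r13 = v.reg .r13 → s.reg .r15 = v.reg .r15 →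
      s.mem = ((v.mem.writeLE (g.e.reg .rsp - 1488) 8 x).writeLE (g.e.reg .rsp - 1444) 4 c).writeLE
        (g.e.reg .rsp - 1464) 4 m →
      c = i + 1 → m = maxPartRead v.mem g.f (i + 1) →
      Mem.EqOn Vorbis.L.textLo Vorbis.L.textHi u₀.mem s.mem → abiInv s → AtR17 u₀ g (i + 1) s

/-- **The first half of `ExitOK`**: the three stores of the segment are a footprint inside start_decoder's spill area
`[R − 8, R) ∪ [R + 10H, R + 14H) ∪ [R + 24H, R + 28H)`; every allocated block of the run's predicate (the arena's, `*f`, the fixed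
objects) is kept, `*f` reads the same (`ObjSame`), the shadow is untouched, `blocksize_1` and `residue_count` read the same. What
is left of `ExitOK` is to feed these to the frame lemmas `late_carry`, `Frame.carry_sec`, `maxPartRead_congr`: `exit_ok`. -/
theorem exit_kept {u₀ : State} {g : Ghost} {i : Nat} {v : State} {A9 A10 : Arena} {A : Arena × List Obj}
    (hb : BodyR18 u₀ g i A9 A10 A v) (s : State) (x c m : Nat)
    (hmem : s.mem = ((v.mem.writeLE (g.e.reg .rsp - 1488) 8 x).writeLE (g.e.reg .rsp - 1444) 4 c).writeLE
      (g.e.reg .rsp - 1464) 4 m)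
    :
    Mem.SameExcept [⟨g.R - 8, g.R⟩, ⟨g.R + 0x24, g.R + 0x28⟩, ⟨g.R + 0x10, g.R + 0x14⟩] v.mem s.mem ∧
      (∀ B, g.Blk A B → B.Kept v.mem s.mem) ∧ ObjSame g.f v.mem s.mem ∧ Mem.EqOn 0xC00000 0xE00000 v.mem s.mem ∧
      bsize s.mem g.f 1 = bsize v.mem g.f 1 ∧
      stb_vorbis.residue_count s.mem g.f = stb_vorbis.residue_count v.mem g.f := by
  have hl := hb.loop
  have hfr := hl.frame
  have hlate := hl.late
  have hown := hlate.own
  have hF := facts_of hb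
  have hi64 := hF.i64
  obtain ⟨hRA8, hroom, htop⟩ := hfr.ra
  obtain ⟨hRR, hR8⟩ := hfr.r_eq
  simp only [depth, steady] at hroom hRR
  have hRAdef : g.RA = (g.e.reg .rsp).toNat := rfl
  obtain ⟨hf1, hf2, hf3⟩ := f_where hfr hl.hand
  have hlen : g.len ≤ 0x1FF000 := hlate.bits.remaining_le.2
  have hC : stb_vorbis.channels v.mem g.f ≤ 16 := hlate.header.HD1.2
  -- the three stores, at number addresses
  have e1 : g.e.reg .rsp - 1488 = addr (g.R - 8) := eq_addr _ _ (by u_omega)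
  have e2 : g.e.reg .rsp - 1444 = addr (g.R + 0x24) := eq_addr _ _ (by u_omega)
  have e3 : g.e.reg .rsp - 1464 = addr (g.R + 0x10) := eq_addr _ _ (by u_omega)
  have eR : g.e.reg .rsp - 1480 = addr g.R := eq_addr _ _ (by u_omega)
  rw [e1, e2, e3] at hmem
  have t1 : (addr (g.R - 8)).toNat = g.R - 8 := toNat_addr _ (by omega)
  have t2 : (addr (g.R + 0x24)).toNat = g.R + 0x24 := toNat_addr _ (by omega)
  have t3 : (addr (g.R + 0x10)).toNat = g.R + 0x10 := toNat_addr _ (by omega)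
  -- the footprint of the segment
  have hsame : Mem.SameExcept [⟨g.R - 8, g.R⟩, ⟨g.R + 0x24, g.R + 0x28⟩, ⟨g.R + 0x10, g.R + 0x14⟩] v.mem s.mem := by
    rw [hmem]
    refine Mem.SameExcept.step_writeLE _ 4 m (Mem.SameExcept.step_writeLE _ 4 c
      (Mem.SameExcept.writeLE _ v.mem _ 8 x ?_ ?_) ?_ ?_) ?_ ?_
    · rw [t1]
      omega
    · exact ⟨⟨g.R - 8, g.R⟩, List.mem_cons_self, by rw [t1]; exact Nat.le_refl _, by rw [t1]; show g.R - 8 + 8 ≤ g.R; omega⟩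
    · rw [t2]
      omega
    · exact ⟨⟨g.R + 0x24, g.R + 0x28⟩, List.mem_cons_of_mem _ List.mem_cons_self, by rw [t2]; exact Nat.le_refl _,
        by rw [t2]; exact Nat.le_refl _⟩
    · rw [t3]
      omega
    · exact ⟨⟨g.R + 0x10, g.R + 0x14⟩, List.mem_cons_of_mem _ (List.mem_cons_of_mem _ List.mem_cons_self),
        by rw [t3]; exact Nat.le_refl _, by rw [t3]; exact Nat.le_refl _⟩
  -- what reads the same
  have hE : ∀ lo hi, (hi ≤ g.R - 8 ∨ g.R + 0x28 ≤ lo ∨ (g.R ≤ lo ∧ hi ≤ g.R + 0x10) ∨ (g.R + 0x14 ≤ lo ∧ hi ≤ g.R + 0x24)) →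
      Mem.EqOn lo hi v.mem s.mem := by
    intro lo hi h
    apply hsame.eqOn
    intro w hw
    simp only [List.mem_cons, List.mem_nil_iff, or_false] at hw
    rcases hw with rfl | rfl | rfl <;> simp only [] <;> omega
  have hEhi := hE (g.R + 0x28) (2 ^ 64) (Or.inr (Or.inl (Nat.le_refl _)))
  have hsh : Mem.EqOn 0xC00000 0xE00000 v.mem s.mem := hE _ _ (Or.inr (Or.inl (by omega)))
  -- every allocated block (the arena's, `*f`, the fixed objects) lies off the spill area
  have hoffB : ∀ B, g.Blk A B → B.base + B.size ≤ g.R - 8 ∨ g.R + 0x28 ≤ B.base := by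
    intro B hB
    rcases hB with hs | hm
    · have := hlate.arena.blk_off_stack hs
      omega
    · rcases List.mem_cons.mp hm with rfl | hm'
      · simp only [vblock, voff]
        omega
      · have := fixed_off_stack g.len hlen B hm'
        omega
  have hk : ∀ B, g.Blk A B → B.Kept v.mem s.mem := by
    intro B hB
    apply Block.Kept.of_sameExcept hsame _ (hlate.env.ok.no_wrap hB)
    intro w hw
    have := hoffB B hB
    simp only [List.mem_cons, List.mem_nil_iff, or_false] at hw
    rcases hw with rfl | rfl | rfl <;> simp only [] <;> omega
  have hk9 : ∀ B, A9.Blk B → B.Kept v.mem s.mem := fun B hB => hk B (runBlk_setup (hown.up9 B hB))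
  have hko := hk (objBlock g.f) hlate.bits.OB1
  have hfw : g.f + Off.sizeof.stb_vorbis ≤ 2 ^ 64 := by
    simp only [voff]
    omega
  have hos : ObjSame g.f v.mem s.mem := by
    apply ObjSame.of_sameExcept hsame hfw
    intro w hw
    simp only [List.mem_cons, List.mem_nil_iff, or_false] at hw
    rcases hw with rfl | rfl | rfl <;> simp only [] <;> omega
  -- the fields of `*f` the assertion names
  have erc : stb_vorbis.residue_count s.mem g.f = stb_vorbis.residue_count v.mem g.f := by
    simp only [vacc, voff]
    exact hos.i32 320 (by decide)
  have eb1 : bsize s.mem g.f 1 = bsize v.mem g.f 1 := by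
    rw [bsize_one, bsize_one]
    simp only [vacc, voff]
    rw [hos.i32 156 (by decide)]
  exact ⟨hsame, hk, hos, hsh, eb1, erc⟩

/-- **`max_part_read` over a change of memory** (the inner argument of `T1.transfer`): `*f` reads the same (`ObjSame`), the block of
`residue_config` (R2) is kept, and the counter is at most `residue_count ≤ 64` (R1). -/
theorem maxPartRead_congr {mem mem' : Mem} {f : Nat} (n : Nat) (hos : ObjSame f mem mem')
    (h1 : stb_vorbis.residue_count mem f ≤ 64) (hn : (n : Int) ≤ stb_vorbis.residue_count mem f)
    (hconf : (Block.mk (stb_vorbis.residue_config mem f) (Off.sizeof.Residue * (stb_vorbis.residue_count mem f).toNat)).Kept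
      mem mem') :
    maxPartRead mem' f n = maxPartRead mem f n := by
  have he : ObjEq T1.wins mem f mem' f := hos.sub (by decide)
  have hb1 : stb_vorbis.blocksize_1 mem' f = stb_vorbis.blocksize_1 mem f := by
    simp only [vacc, voff]
    exact he.i32 156 (by decide)
  have econf : stb_vorbis.residue_config mem' f = stb_vorbis.residue_config mem f := by
    simp only [vacc, voff]
    exact he.u64 456 (by decide)
  have eb1 : bsize mem' f 1 = bsize mem f 1 := by
    rw [bsize_one, bsize_one, hb1]
  apply Res.maxUpTo_congr
  intro i hi
  have hi' : i < (stb_vorbis.residue_count mem f).toNat := by omega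
  have et : stb_vorbis.residue_types mem' f i = stb_vorbis.residue_types mem f i := by
    simp only [vacc, voff]
    have hw : InWins T1.wins (324 + 2 * i) 2 := by
      apply InWins.of_mem (320, 464) (by decide)
      · show 320 ≤ 324 + 2 * i
        omega
      · show 324 + 2 * i + 2 ≤ 464
        omega
    exact he.u16_at (324 + 2 * i) hw (by omega) (by omega)
  have eat : stb_vorbis.residue_config_at mem' f i = stb_vorbis.residue_config_at mem f i := by
    unfold stb_vorbis.residue_config_at
    rw [econf]
  have hr : (Block.mk (stb_vorbis.residue_config_at mem f i) Off.sizeof.Residue).Kept mem mem' := by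
    apply hconf.mono
    · simp only [vacc, voff]
      omega
    · simp only [vacc, voff] at hi' ⊢
      omega
  have eb : Residue.begin mem' (stb_vorbis.residue_config_at mem f i)
      = Residue.begin mem (stb_vorbis.residue_config_at mem f i) := by
    simp only [Residue.begin, voff]
    exact hr.u32 _ (by simp only []; omega) (by simp only [voff]; omega)
  have ee : Residue.end_ mem' (stb_vorbis.residue_config_at mem f i)
      = Residue.end_ mem (stb_vorbis.residue_config_at mem f i) := by
    simp only [Residue.end_, voff]
    exact hr.u32 _ (by simp only []; omega) (by simp only [voff]; omega)
  have ep : Residue.part_size mem' (stb_vorbis.residue_config_at mem f i)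
      = Residue.part_size mem (stb_vorbis.residue_config_at mem f i) := by
    simp only [Residue.part_size, voff]
    exact hr.u32 _ (by simp only []; omega) (by simp only [voff]; omega)
  unfold Residue.partReadEst Residue.partRead
  rw [eat, eb, ee, ep, et, eb1]

/-- **FRAME OF `Late`** (the analogue of `Mid.frame` for the points after SD.11) over a batch of stores that leaves `*f` alone
(`ObjSame`; the whole object is a kept block too), keeps every block of the run's predicate (`hk`), and leaves the shadow alone; the
frame constants are given for the new memory. -/
theorem late_carry {g : Ghost} {kc : Nat} {A9 A10 : Arena} {A : Arena × List Obj} {mem mem' : Mem}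
    (h : Late g kc A9 A10 A mem) (hos : ObjSame g.f mem mem') (hk : ∀ B, g.Blk A B → B.Kept mem mem')
    (hconsts : SDFrameConsts kc mem' g.R) (hsh : Mem.EqOn 0xC00000 0xE00000 mem mem') :
    Late g kc A9 A10 A mem' := by
  have hown := h.own
  have hk9 : ∀ B, A9.Blk B → B.Kept mem mem' := fun B hB => hk B (runBlk_setup (hown.up9 B hB))
  have hko := hk (objBlock g.f) h.bits.OB1
  have hfw : g.f + Off.sizeof.stb_vorbis ≤ 2 ^ 64 := hko.inside
  have hC : stb_vorbis.channels mem g.f ≤ 16 := h.header.HD1.2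
  have hfl := hown.cfg.floor (by omega)
  have hcnt := hfl.FL1
  refine
    { env := h.env.eqOn hsh
      consts := hconsts
      arena := h.arena.frame_obj hfw hko.same
      noTemps := h.noTemps
      bits := h.bits.frame hos
      first := ?first
      discard0 := ?discard0
      header := h.header.frame hos
      own :=
        { ext9 := hown.ext9
          ext10 := hown.ext10
          cfg := hown.cfg.frame (hos.sub (by decide)) hk9
          m6 := hown.m6.frame hos hC
          fy := ?fy
          mdct := hown.mdct.frame hos (fun B hB => hk B (runBlk_setup (hown.mdct.reads_blk hB).1)) }
      mode := h.mode.frame hos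
      m7 := ?m7 }
  case first =>
    have e : stb_vorbis.first_decode mem' g.f = stb_vorbis.first_decode mem g.f := by
      simp only [vacc, voff]
      exact hos.u8 1749 (by decide)
    rw [e]
    exact h.first
  case discard0 =>
    have e : stb_vorbis.discard_samples_deferred mem' g.f = stb_vorbis.discard_samples_deferred mem g.f := by
      simp only [vacc, voff]
      exact hos.i32 1784 (by decide)
    rw [e]
    exact h.discard0
  case m7 =>
    have e : stb_vorbis.previous_length mem' g.f = stb_vorbis.previous_length mem g.f := by
      simp only [vacc, voff]
      exact hos.i32 1256 (by decide)
    rw [e]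
    exact h.m7
  case fy =>
    -- FY1 reads `channels`, the sixteen `finalY[c]`, `floor_count`, `floor_config`, and `values` of every floor (the block of FL2)
    have hkept := hk9 _ hfl.FL2
    apply hown.fy.frame_of_eq
    · simp only [vacc, voff]
      exact hos.i32 4 (by decide)
    · intro c hc
      simp only [vacc, voff]
      rw [Nat.add_assoc g.f]
      exact hos.u64 (1264 + 8 * c) (InWins.of_mem (136, 1808) (by decide) (by omega) (by omega))
    · simp only [vacc, voff]
      exact hos.i32 176 (by decide)
    · simp only [vacc, voff]
      exact hos.u64 312 (by decide)
    · intro i hi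
      simp only [Floor1.values, stb_vorbis.floor_config_at, voff]
      apply hkept.i32
      · simp only [floorBlock, voff]
        omega
      · simp only [floorBlock, voff]
        omega

/-- **Where things are at a point after SD.11** (`Pos.of_mid` for `Late`): the steady stack pointer against the return-address slot,
`*f` against the own frame and the arena's buffer, the arena's buffer in the data space, `log2_4` outside both. -/
theorem pos_of_late {u₀ : State} {g : Ghost} {pc : Word} {kc : Nat} {A9 A10 : Arena} {A : Arena × List Obj} {v : State} {mem : Mem}
    (hfr : Frame u₀ g pc A v) (hh : g.Hand A) (hm : Late g kc A9 A10 A mem) : Pos g A := by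
  have hr := hfr.r_eq.1
  obtain ⟨_, r2, r3⟩ := hfr.ra
  have hobr := hm.bits.OBR
  have hout := hh.objOut
  have a1 := hm.arena.AR1
  have a1x := hm.arena.AR1x
  simp only [steady, depth, voff] at hr r2 hobr hout
  have hlog := hh.outside ⟨0x120640, 16⟩ (by
    unfold fixedBlocks globalBlocks
    exact List.mem_cons_of_mem _ (List.mem_cons_of_mem _ (List.mem_cons_of_mem _ (List.mem_cons_of_mem _
      List.mem_cons_self))))
  simp only [] at hlog
  exact
    { r_eq := hr
      ra_lo := r2
      ra_hi := r3
      f_lo := hobr.1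
      f_hi := hobr.2
      f_stack := f_off_frame hfr hh
      objOut := hout
      log2Out := by omega
      ar_lo := a1x.1
      ar_hi := a1.2.2.2
      ar_stack := a1x.2
      fixedOut := hh.outside
      extB := hfr.ext.B.symm
      extL := hfr.ext.L.symm }

/-- **The exit assertion** (0x116059, the head of loop 4189 with `i + 1`): `EstLoop` at `pc_R17` from `BodyR18` over the three stores
of the segment into start_decoder's own spill area. `Frame` by `Frame.carry_sec`, `Late` by `late_carry`, `max_part_read` by
`maxPartRead_congr`, the two slots read back from the stores. -/
theorem exit_ok (u₀ : State) : ExitOK u₀ := by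
  intro g i v A9 A10 A hb s x c m hrip hrsp hrbp hr13 hr15 hmem hc hm hcode hinv
  obtain ⟨hsame, hk, hos, hsh, eb1, erc⟩ := exit_kept hb s x c m hmem
  have hl := hb.loop
  have hfr := hl.frame
  have hlate := hl.late
  have hown := hlate.own
  have hF := facts_of hb
  have hres := hown.cfg.residue (by omega)
  obtain ⟨hRA8, hroom, htop⟩ := hfr.ra
  obtain ⟨hRR, hR8⟩ := hfr.r_eq
  simp only [depth, steady] at hroom hRR
  have hRAdef : g.RA = (g.e.reg .rsp).toNat := rfl
  have hp : Pos g A := pos_of_late hfr hl.hand hlate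
  -- the three stores, at number addresses
  have e1 : g.e.reg .rsp - 1488 = addr (g.R - 8) := eq_addr _ _ (by u_omega)
  have e2 : g.e.reg .rsp - 1444 = addr (g.R + 0x24) := eq_addr _ _ (by u_omega)
  have e3 : g.e.reg .rsp - 1464 = addr (g.R + 0x10) := eq_addr _ _ (by u_omega)
  have eR : g.e.reg .rsp - 1480 = addr g.R := eq_addr _ _ (by u_omega)
  rw [e1, e2, e3] at hmem
  have t1 : (addr (g.R - 8)).toNat = g.R - 8 := toNat_addr _ (by omega)
  have t2 : (addr (g.R + 0x24)).toNat = g.R + 0x24 := toNat_addr _ (by omega)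
  have t3 : (addr (g.R + 0x10)).toNat = g.R + 0x10 := toNat_addr _ (by omega)
  -- what reads the same
  have hE : ∀ lo hi, (hi ≤ g.R - 8 ∨ g.R + 0x28 ≤ lo ∨ (g.R ≤ lo ∧ hi ≤ g.R + 0x10) ∨ (g.R + 0x14 ≤ lo ∧ hi ≤ g.R + 0x24)) →
      Mem.EqOn lo hi v.mem s.mem := by
    intro lo hi h
    apply hsame.eqOn
    intro w hw
    simp only [List.mem_cons, List.mem_nil_iff, or_false] at hw
    rcases hw with rfl | rfl | rfl <;> simp only [] <;> omega
  -- the frame constants of point 12: the shadow index `[R + 8]` and ONE20 `[R + 20H]` (Z10, Z24 are no longer asserted)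
  have hconsts : SDFrameConsts 12 s.mem g.R := by
    obtain ⟨c1, c2, c3, _, _⟩ := hlate.consts
    refine ⟨c1, ?_, ?_, fun h => absurd h (by decide), fun _ h => absurd h (by decide)⟩
    · rw [(hE (g.R + 8) (g.R + 0x10) (Or.inr (Or.inr (Or.inl ⟨by omega, by omega⟩)))).u64 (g.R + 8) (by omega) (by omega)
        (by omega)]
      exact c2
    · rw [(hE (g.R + 0x14) (g.R + 0x24) (Or.inr (Or.inr (Or.inr ⟨by omega, by omega⟩)))).u32 (g.R + 0x20) (by omega) (by omega)
        (by omega)]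
      exact c3
  have hlate' : Late g 12 A9 A10 A s.mem := late_carry hlate hos hk hconsts hsh
  -- `Frame` at the head of the loop: the three windows lie in the stack below `[R + 8]` or in the own frame from `[R + 10H]` on
  have hok : ∀ w, w ∈ [(⟨g.R - 8, g.R⟩ : Span), ⟨g.R + 0x24, g.R + 0x28⟩, ⟨g.R + 0x10, g.R + 0x14⟩] → SecWin g A w := by
    intro w hw
    unfold SecWin
    simp only [List.mem_cons, List.mem_nil_iff, or_false] at hw
    rcases hw with rfl | rfl | rfl <;> simp only [] <;> omega
  have hfr' : Frame u₀ g pc_R17 A s :=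
    hfr.carry_sec hp hsame hsh hok hrip (hrsp.trans eR) hcode hinv
  -- the estimate so far is at most `blocksize_1 ≤ 8192`
  have hmle : m ≤ 8192 := by
    have h1 := maxPartRead_le v.mem g.f (i + 1)
    have h2 := hF.b1le
    omega
  have hlt := hb.lt
  have hi64 := hF.i64
  refine ⟨A9, A10, A, hfr', hl.hand, hlate', ?rbp, ?cnt, ?i_le, ?est, ?r15, ?r13⟩
  case rbp =>
    rw [hrbp]
    exact (addr_toNat _).symm
  case cnt =>
    -- dword `[R + 24H]`: the second store, read through the third
    show s.mem.u32 (g.R + 0x24) = i + 1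
    rw [← Mem.readLE_addr4, hmem, Mem.readLE_writeLE_disjoint_noWrap, Mem.readLE_writeLE_same _ _ _ _ (by decide), hc]
    · omega
    · u_omega
    · u_omega
    · u_omega
  case i_le =>
    rw [erc]
    omega
  case est =>
    -- dword `[R + 10H]`: the third store; `max_part_read` reads the same in the new memory
    show s.mem.u32 (g.R + 0x10) = maxPartRead s.mem g.f (i + 1)
    rw [maxPartRead_congr (i + 1) hos hres.R1.2 (by omega) (hk _ (runBlk_setup (hown.up9 _ hres.R2))), ← hm,
      ← Mem.readLE_addr4, hmem, Mem.readLE_writeLE_same _ _ _ _ (by decide)]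
    omega
  case r15 =>
    rw [hr15, eb1]
    exact hl.r15
  case r13 =>
    rw [hr13, eb1]
    exact hl.r13

/-- **The tail** (0x116811 … 0x11681a; C line 4189 `++i` and the store of `max_part_read`): `add [rsp+24H], 1 ; mov [rsp+10H], edx ;
jmp 116059`, from the join after the `jl` to the exit assertion `AtR17 (i + 1)`. -/
theorem tail_ok (Lay : Layout) (hLay : Lay.hi = 0x1000000) (μ : Microarch) (hμ : UserX.MicroOK μ) (u₀ : State)
    (hcode : HasCodeNat Lay u₀ Vorbis.L.start_decoder.entry Vorbis.Code.code_start_decoder.nat Vorbis.L.start_decoder.size)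
    (g : Ghost) (i : Nat) (v : State) (A9 A10 : Arena) (A : Arena × List Obj) (hex : ExitOK u₀) (hb : BodyR18 u₀ g i A9 A10 A v)
    (s : State) (hst : St u₀ g v s 0x116811) (m32 : BitVec 32) (hrdx : s.reg .rdx = Word.ofBV m32)
    (hm : m32.toNat = maxPartRead v.mem g.f (i + 1)) :
    ReachVia Lay μ WayInv s (fun w => AtR17 u₀ g (i + 1) w) := by
  have hfr := hb.loop.frame
  have he := hfr.entry
  v_entry he
  simp only [depth, UInt64.reduceOfNat, Nat.reduceAdd] at he_room he_stack
  obtain ⟨hs_rip, hs_rsp, hs_rbp, hs_r13, hs_r15, ⟨x, hs_mem⟩, w_eq, hdf, hmx⟩ := hst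
  have hF := facts_of hb
  have r_cnt := hF.rd_cnt
  have hi64 := hF.i64
  u_walk hcode [hμ.vendor] until [Vorbis.L.start_decoder.cut277] span [Vorbis.L.textLo, Vorbis.L.textHi] side (v_side)
  -- 0x116059: the exit, the head of loop 4189 with `i + 1`
  refine ReachVia.done ?_
  refine hex g i v A9 A10 A hb s_11681a x _ _ w_rip ?_ ?_ ?_ ?_ w_mem ?_ hm w_eq ?_
  · rw [w_kept .rsp rfl]
    exact hs_rsp
  · rw [w_kept .rbp rfl]
    exact hs_rbp
  · rw [w_kept .r13 rfl]
    exact hs_r13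
  · rw [w_kept .r15 rfl]
    exact hs_r15
  · have e : (BitVec.ofNat 32 i).toNat = i := toNat_ofNat32 i (by omega)
    rw [BitVec.toNat_add, e]
    show (i + 1) % 2 ^ 32 = i + 1
    omega
  · v_inv

/-- **The division and the running maximum** (0x116800 … 0x11680f; C lines 4195 – 4196): `div DWORD [r12+8]` (unsigned, `edx = 0`,
the divisor `part_size ≥ 1` by R5: no #DE), `mov edx, eax ; mov esi, [rsp+10H] ; cmp esi, eax ; jl ; mov edx, esi`: at the join
`edx = max(max_part_read, part_read)`. `n32` = `n_read`. -/
theorem dv_ok (Lay : Layout) (hLay : Lay.hi = 0x1000000) (μ : Microarch) (hμ : UserX.MicroOK μ) (u₀ : State)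
    (hcode : HasCodeNat Lay u₀ Vorbis.L.start_decoder.entry Vorbis.Code.code_start_decoder.nat Vorbis.L.start_decoder.size)
    (g : Ghost) (i : Nat) (v : State) (A9 A10 : Arena) (A : Arena × List Obj) (hex : ExitOK u₀) (hb : BodyR18 u₀ g i A9 A10 A v)
    (s : State) (hst : St u₀ g v s 0x116800) (rw : Word) (hr12 : s.reg .r12 = rw)
    (hrw : rw.toNat = stb_vorbis.residue_config_at v.mem g.f i)
    (n32 : BitVec 32) (hrax : s.reg .rax = Word.ofBV n32) (hrdx : s.reg .rdx = Word.ofBV 0#32)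
    (hn : n32.toNat = min (Residue.end_ v.mem (stb_vorbis.residue_config_at v.mem g.f i))
        (Res.actualEst (stb_vorbis.residue_types v.mem g.f i) (bsize v.mem g.f 1))
      - min (Residue.begin v.mem (stb_vorbis.residue_config_at v.mem g.f i))
        (Res.actualEst (stb_vorbis.residue_types v.mem g.f i) (bsize v.mem g.f 1))) :
    ReachVia Lay μ WayInv s (fun w => AtR17 u₀ g (i + 1) w) := by
  have hfr := hb.loop.frame
  have he := hfr.entry
  v_entry he
  simp only [depth, UInt64.reduceOfNat, Nat.reduceAdd] at he_room he_stack
  obtain ⟨hs_rip, hs_rsp, hs_rbp, hs_r13, hs_r15, ⟨x, hs_mem⟩, w_eq, hdf, hmx⟩ := hst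
  have hF := facts_of hb
  obtain ⟨hrw1, hrw2, hrw3⟩ := hF.rwhere
  have h5 := hF.r5
  have hel := hF.est_le
  have hbl := hF.b1le
  have hsucc := maxPartRead_succ v.mem g.f i
  unfold Residue.partReadEst Residue.partRead at hsucc
  rw [Res.partRead_def] at hsucc
  have hale : Res.actualEst (stb_vorbis.residue_types v.mem g.f i) (bsize v.mem g.f 1) ≤ bsize v.mem g.f 1 := by
    rw [Res.actualEst_def]
    split <;> omega
  -- the ghost values, as variables
  obtain ⟨r, hr⟩ : ∃ r, stb_vorbis.residue_config_at v.mem g.f i = r := ⟨_, rfl⟩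
  rw [hr] at hrw hn hrw1 hrw2 hrw3 h5 hsucc
  obtain ⟨ps, hpd⟩ : ∃ b, Residue.part_size v.mem r = b := ⟨_, rfl⟩
  obtain ⟨est, hest⟩ : ∃ b, maxPartRead v.mem g.f i = b := ⟨_, rfl⟩
  have hps32 : ps < 2 ^ 32 := by
    rw [← hpd]
    exact Mem.u32_lt _ _
  rw [hpd] at h5 hsucc
  rw [hest] at hel hsucc
  have r_est := hF.rd_est
  rw [hest] at r_est
  -- the divisor, read through the return-address slot of the last check
  have r_ps : s.mem.readLE (rw + 8) 4 = ps := by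
    rw [hs_mem, Mem.readLE_writeLE_disjoint_noWrap]
    · rw [rd32 v.mem (rw + 8) (r + 8) (by u_omega), ← hpd]
      rfl
    · u_omega
    · u_omega
    · u_omega
  have hd : BitVec.ofNat 32 ps ≠ 0 := by
    intro e0
    have e1 := congrArg BitVec.toNat e0
    rw [toNat_ofNat32 ps hps32] at e1
    have e2 : (0 : BitVec 32).toNat = 0 := rfl
    omega
  have hdiv := Alu.div_unsigned_narrow n32 (BitVec.ofNat 32 ps) hd
  u_walk hcode [hμ.vendor] until [0x116811] span [Vorbis.L.textLo, Vorbis.L.textHi] side (v_side)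
  · -- the `div` does not fault
    cases hdiv.symm.trans hopt1
  · -- 0x11680d `jl` taken: `part_read > max_part_read`, edx = part_read
    have hq : qr_116800 = (n32 / BitVec.ofNat 32 ps, n32 % BitVec.ofNat 32 ps) :=
      Option.some.inj (hopt_116800.symm.trans hdiv)
    subst hq
    have hqn : (n32 / BitVec.ofNat 32 ps).toNat = n32.toNat / ps := by
      rw [BitVec.toNat_udiv, toNat_ofNat32 ps hps32]
    have hqle : n32.toNat / ps ≤ n32.toNat := Nat.div_le_self _ _
    have hest32 : (BitVec.ofNat 32 est).toNat = est := toNat_ofNat32 est (by omega)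
    have hn_le : n32.toNat ≤ 8192 := by omega
    dsimp only at hbr_11680d w_rdx
    rw [toInt_of_lt _ (by omega), toInt_of_lt _ (by omega), hest32, hqn] at hbr_11680d
    have hm : (n32 / BitVec.ofNat 32 ps).toNat = maxPartRead v.mem g.f (i + 1) := by
      rw [hsucc, hqn, ← hn]
      generalize n32.toNat / ps = q at *
      omega
    refine tail_ok Lay hLay μ hμ u₀ hcode g i v A9 A10 A hex hb s_11680d
      ⟨w_rip, (w_kept .rsp rfl).trans hs_rsp, (w_kept .rbp rfl).trans hs_rbp, (w_kept .r13 rfl).trans hs_r13,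
        (w_kept .r15 rfl).trans hs_r15, ⟨x, w_mem⟩, w_eq, ?_, ?_⟩ _ w_rdx hm
    · rw [w_flags]
      simp only [X86.User.df_setStatus]
      exact hdf
    · rw [w_mxcsr]
      exact hmx
  · -- 0x11680f `mov edx, esi`: `part_read ≤ max_part_read`, edx = max_part_read
    have hq : qr_116800 = (n32 / BitVec.ofNat 32 ps, n32 % BitVec.ofNat 32 ps) :=
      Option.some.inj (hopt_116800.symm.trans hdiv)
    subst hq
    have hqn : (n32 / BitVec.ofNat 32 ps).toNat = n32.toNat / ps := by
      rw [BitVec.toNat_udiv, toNat_ofNat32 ps hps32]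
    have hqle : n32.toNat / ps ≤ n32.toNat := Nat.div_le_self _ _
    have hest32 : (BitVec.ofNat 32 est).toNat = est := toNat_ofNat32 est (by omega)
    have hn_le : n32.toNat ≤ 8192 := by omega
    dsimp only at hbr_11680d w_rdx
    rw [toInt_of_lt _ (by omega), toInt_of_lt _ (by omega), hest32, hqn] at hbr_11680d
    have hm : (BitVec.ofNat 32 est).toNat = maxPartRead v.mem g.f (i + 1) := by
      rw [hsucc, hest32, ← hn]
      generalize n32.toNat / ps = q at *
      omega
    refine tail_ok Lay hLay μ hμ u₀ hcode g i v A9 A10 A hex hb s_11680f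
      ⟨w_rip, (w_kept .rsp rfl).trans hs_rsp, (w_kept .rbp rfl).trans hs_rbp, (w_kept .r13 rfl).trans hs_r13,
        (w_kept .r15 rfl).trans hs_r15, ⟨x, w_mem⟩, w_eq, ?_, ?_⟩ _ w_rdx hm
    · rw [w_flags]
      simp only [X86.User.df_setStatus]
      exact hdf
    · rw [w_mxcsr]
      exact hmx

/-- **The two limits and `n_read`** (0x1167c3 … 0x1167fb; C lines 4192 – 4195): three checked loads of the record `r` (`begin`, `end`,
`part_size`), `r14d = min(begin, A)`, `eax = min(end, A) − r14d` (two `cmova`: three feasible paths, R4 prunes the fourth),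
`mov edx, 0`. `a32` = `actual_size` = A. -/
theorem mid_ok (Lay : Layout) (hLay : Lay.hi = 0x1000000) (μ : Microarch) (hμ : UserX.MicroOK μ) (u₀ : State)
    (hcode : HasCodeNat Lay u₀ Vorbis.L.start_decoder.entry Vorbis.Code.code_start_decoder.nat Vorbis.L.start_decoder.size)
    (h4 : Asan.SmallCheck Lay μ Vorbis.WayInv (Vorbis.CodeOK u₀) [.rax, .rcx, .rdx] 4 Vorbis.L.__asan_load4_noabort.entry)
    (g : Ghost) (i : Nat) (v : State) (A9 A10 : Arena) (A : Arena × List Obj) (hex : ExitOK u₀) (hb : BodyR18 u₀ g i A9 A10 A v)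
    (s : State) (hst : St u₀ g v s 0x1167c3) (rw : Word) (hr12 : s.reg .r12 = rw)
    (hrw : rw.toNat = stb_vorbis.residue_config_at v.mem g.f i)
    (a32 : BitVec 32) (hrbx : s.reg .rbx = Word.ofBV a32)
    (ha : a32.toNat = Res.actualEst (stb_vorbis.residue_types v.mem g.f i) (bsize v.mem g.f 1)) :
    ReachVia Lay μ WayInv s (fun w => AtR17 u₀ g (i + 1) w) := by
  have hl := hb.loop
  have hfr := hl.frame
  have hlate := hl.late
  have he := hfr.entry
  v_entry he
  simp only [depth, UInt64.reduceOfNat, Nat.reduceAdd] at he_room he_stack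
  obtain ⟨hs_rip, hs_rsp, hs_rbp, hs_r13, hs_r15, ⟨x, hs_mem⟩, w_eq, hdf, hmx⟩ := hst
  have hF := facts_of hb
  obtain ⟨hrw1, hrw2, hrw3⟩ := hF.rwhere
  have h4' := hF.r4
  have hbl := hF.b1le
  have hale : Res.actualEst (stb_vorbis.residue_types v.mem g.f i) (bsize v.mem g.f 1) ≤ bsize v.mem g.f 1 := by
    rw [Res.actualEst_def]
    split <;> omega
  -- the three check sites: inside record `i` of `residue_config` (R2)
  have hres : ResidueOK (g.Blk A) v.mem g.f :=
    (hlate.own.cfg.residue (by omega)).reblk (fun B _ hB => runBlk_setup (hlate.own.up9 B hB))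
  have hsite : ∀ off, off + 4 ≤ 32 → Site (g.Live A) (stb_vorbis.residue_config_at v.mem g.f i + off) 4 :=
    fun off ho => hres.site_record hlate.env.live hb.lt off 4 (by simp only [voff]; omega) (by omega) rfl
  -- the ghost values, as variables
  obtain ⟨r, hr⟩ : ∃ r, stb_vorbis.residue_config_at v.mem g.f i = r := ⟨_, rfl⟩
  rw [hr] at hrw hrw1 hrw2 hrw3 h4' hsite
  obtain ⟨aa, haa⟩ : ∃ b, Res.actualEst (stb_vorbis.residue_types v.mem g.f i) (bsize v.mem g.f 1) = b := ⟨_, rfl⟩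
  rw [haa] at ha hale
  have hbd : Residue.begin v.mem r = v.mem.u32 r := rfl
  have hed : Residue.end_ v.mem r = v.mem.u32 (r + 4) := rfl
  obtain ⟨b, hb0⟩ : ∃ b, v.mem.u32 r = b := ⟨_, rfl⟩
  obtain ⟨e, he0⟩ : ∃ b, v.mem.u32 (r + 4) = b := ⟨_, rfl⟩
  have hb32 : b < 2 ^ 32 := by
    rw [← hb0]
    exact Mem.u32_lt _ _
  have he32 : e < 2 ^ 32 := by
    rw [← he0]
    exact Mem.u32_lt _ _
  rw [hbd, hed, hb0, he0] at h4'
  have r_b : v.mem.readLE rw 4 = b := by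
    rw [rd32 v.mem rw r hrw]
    exact hb0
  have r_e : v.mem.readLE (rw + 4) 4 = e := by
    rw [rd32 v.mem (rw + 4) (r + 4) (by u_omega)]
    exact he0
  u_walk hcode [hμ.vendor] until [0x116800] span [Vorbis.L.textLo, Vorbis.L.textHi] side (v_side)
  case check_1167c6 =>
    -- the check of the load at `r + 0`: inside record `i` (R2), the shadow untouched
    have hun : ShadowUntouched v.mem s_1167c6.mem := by v_untouched
    exact Vorbis.Spec.check_site hfr.shadow hun (hsite 0 (by omega)) (by u_omega)
  case check_1167db =>
    -- the check of the load at `r + 4`: inside record `i` (R2), the shadow untouched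
    have hun : ShadowUntouched v.mem s_1167db.mem := by v_untouched
    exact Vorbis.Spec.check_site hfr.shadow hun (hsite 4 (by omega)) (by u_omega)
  case check_1167f4 =>
    -- the check of the load at `r + 8`: inside record `i` (R2), the shadow untouched
    have hun : ShadowUntouched v.mem s_1167f4.mem := by v_untouched
    exact Vorbis.Spec.check_site hfr.shadow hun (hsite 8 (by omega)) (by u_omega)
  case check_1167db =>
    -- the check of the load at `r + 4`: inside record `i` (R2), the shadow untouched
    have hun : ShadowUntouched v.mem s_1167db.mem := by v_untouched
    exact Vorbis.Spec.check_site hfr.shadow hun (hsite 4 (by omega)) (by u_omega)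
  case check_1167f4 =>
    -- the check of the load at `r + 8`: inside record `i` (R2), the shadow untouched
    have hun : ShadowUntouched v.mem s_1167f4.mem := by v_untouched
    exact Vorbis.Spec.check_site hfr.shadow hun (hsite 8 (by omega)) (by u_omega)
  case check_1167f4 =>
    -- the check of the load at `r + 8`: inside record `i` (R2), the shadow untouched
    have hun : ShadowUntouched v.mem s_1167f4.mem := by v_untouched
    exact Vorbis.Spec.check_site hfr.shadow hun (hsite 8 (by omega)) (by u_omega)
  · -- begin > A, end > A: n_read = A − A
    refine dv_ok Lay hLay μ hμ u₀ hcode g i v A9 A10 A hex hb s_1167fb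
      ⟨w_rip, w_rsp, (w_kept .rbp rfl).trans hs_rbp, (w_kept .r13 rfl).trans hs_r13, (w_kept .r15 rfl).trans hs_r15,
        ⟨_, by rw [w_mem, Mem.writeLE_writeLE_same _ _ _ _ _ (by decide)]⟩, w_eq, ?_, ?_⟩
      rw ((w_kept .r12 rfl).trans hr12) (by rw [hr]; exact hrw) _ w_rax w_rdx ?_
    · rw [w_flags]
      exact w_df_1167f4
    · rw [w_mxcsr]
      exact hmx
    · rw [hr, haa, hbd, hed, hb0, he0, BitVec.toNat_sub]
      have eb : (BitVec.ofNat 32 b).toNat = b := toNat_ofNat32 b hb32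
      have ee : (BitVec.ofNat 32 e).toNat = e := toNat_ofNat32 e he32
      omega
  · -- begin ≤ A < end: n_read = A − begin
    refine dv_ok Lay hLay μ hμ u₀ hcode g i v A9 A10 A hex hb s_1167fb
      ⟨w_rip, w_rsp, (w_kept .rbp rfl).trans hs_rbp, (w_kept .r13 rfl).trans hs_r13, (w_kept .r15 rfl).trans hs_r15,
        ⟨_, by rw [w_mem, Mem.writeLE_writeLE_same _ _ _ _ _ (by decide)]⟩, w_eq, ?_, ?_⟩
      rw ((w_kept .r12 rfl).trans hr12) (by rw [hr]; exact hrw) _ w_rax w_rdx ?_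
    · rw [w_flags]
      exact w_df_1167f4
    · rw [w_mxcsr]
      exact hmx
    · rw [hr, haa, hbd, hed, hb0, he0, BitVec.toNat_sub]
      have eb : (BitVec.ofNat 32 b).toNat = b := toNat_ofNat32 b hb32
      have ee : (BitVec.ofNat 32 e).toNat = e := toNat_ofNat32 e he32
      omega
  · -- end ≤ A: n_read = end − begin
    refine dv_ok Lay hLay μ hμ u₀ hcode g i v A9 A10 A hex hb s_1167fb
      ⟨w_rip, w_rsp, (w_kept .rbp rfl).trans hs_rbp, (w_kept .r13 rfl).trans hs_r13, (w_kept .r15 rfl).trans hs_r15,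
        ⟨_, by rw [w_mem, Mem.writeLE_writeLE_same _ _ _ _ _ (by decide)]⟩, w_eq, ?_, ?_⟩
      rw ((w_kept .r12 rfl).trans hr12) (by rw [hr]; exact hrw) _ w_rax w_rdx ?_
    · rw [w_flags]
      exact w_df_1167f4
    · rw [w_mxcsr]
      exact hmx
    · rw [hr, haa, hbd, hed, hb0, he0, BitVec.toNat_sub]
      have eb : (BitVec.ofNat 32 b).toNat = b := toNat_ofNat32 b hb32
      have ee : (BitVec.ofNat 32 e).toNat = e := toNat_ofNat32 e he32
      omega

/-- **The record and `actual_size`** (0x116784 … 0x1167c0 / 0x11682c; C lines 4190 – 4191): the checked load of `f->residue_config`,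
`r12 = residue_config + 32·i` (`i` from `[rsp+24H]`), the checked load of `f->residue_types[i]`, and `ebx = blocksize_1` (type 2) or
`blocksize_1 / 2` (`cdq ; idiv ecx`, `ecx = 2`: no #DE) — FIX 9. Both paths join at 0x1167c3. -/
theorem head_ok (Lay : Layout) (hLay : Lay.hi = 0x1000000) (μ : Microarch) (hμ : UserX.MicroOK μ) (u₀ : State)
    (hcode : HasCodeNat Lay u₀ Vorbis.L.start_decoder.entry Vorbis.Code.code_start_decoder.nat Vorbis.L.start_decoder.size)
    (h8 : Asan.SmallCheck Lay μ Vorbis.WayInv (Vorbis.CodeOK u₀) [.rax, .rcx, .rdx] 8 Vorbis.L.__asan_load8_noabort.entry)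
    (h2 : Asan.SmallCheck Lay μ Vorbis.WayInv (Vorbis.CodeOK u₀) [.rax, .rcx, .rdx] 2 Vorbis.L.__asan_load2_noabort.entry)
    (h4 : Asan.SmallCheck Lay μ Vorbis.WayInv (Vorbis.CodeOK u₀) [.rax, .rcx, .rdx] 4 Vorbis.L.__asan_load4_noabort.entry)
    (g : Ghost) (i : Nat) (v : State) (A9 A10 : Arena) (A : Arena × List Obj) (hex : ExitOK u₀) (hb : BodyR18 u₀ g i A9 A10 A v) :
    ReachVia Lay μ WayInv v (fun w => AtR17 u₀ g (i + 1) w) := by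
  have hl := hb.loop
  have hfr := hl.frame
  have hlate := hl.late
  have he := hfr.entry
  v_entry he
  simp only [depth, UInt64.reduceOfNat, Nat.reduceAdd] at he_room he_stack
  have hF := facts_of hb
  have hR : addr g.R = g.e.reg .rsp - 1480 := by
    unfold Ghost.R Ghost.RA
    simp only [steady]
    rw [← addr_sub_lit _ 1480 (by omega), addr_toNat]
  have hFa : addr g.f = g.e.reg .rdi := addr_toNat _
  have hfdef : g.f = (g.e.reg .rdi).toNat := rfl
  have hv_rip := hfr.rip
  have hv_rsp := hfr.rsp
  rw [hR] at hv_rsp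
  have hv_rbp := hl.rbp
  rw [hFa] at hv_rbp
  have hi64 := hF.i64
  have hbl := hF.b1le
  have h15 := hF.r15
  obtain ⟨hfw1, hfw2, hfw3⟩ := hF.fwhere
  obtain ⟨hrw1, hrw2, hrw3⟩ := hF.rwhere
  have hrdef : stb_vorbis.residue_config_at v.mem g.f i = stb_vorbis.residue_config v.mem g.f + 32 * i := rfl
  rw [hrdef] at hrw1 hrw2 hrw3
  -- the loads of the walk, named
  obtain ⟨iw, hiw, hin⟩ : ∃ w : Word, Word.ofBV (BitVec.signExtend 64 (BitVec.ofNat 32 i)) = w ∧ w.toNat = i :=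
    ⟨_, rfl, sext_i i hi64⟩
  have r_cnt := hF.rd_cnt
  obtain ⟨cfg, hcfg⟩ : ∃ c, stb_vorbis.residue_config v.mem g.f = c := ⟨_, rfl⟩
  rw [hcfg] at hrw1 hrw2 hrw3
  obtain ⟨cw, hcn, r_cfg⟩ : ∃ w : Word, w.toNat = cfg ∧ UInt64.ofNat (v.mem.readLE (g.e.reg .rdi + 456) 8) = w := by
    refine ⟨UInt64.ofNat cfg, ?_, ?_⟩
    · rw [UInt64.toNat_ofNat']
      omega
    · rw [rd64 v.mem (g.e.reg .rdi + 456) (g.f + 456) (by u_omega), ← hcfg]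
      rfl
  obtain ⟨ty, hty⟩ : ∃ t, stb_vorbis.residue_types v.mem g.f i = t := ⟨_, rfl⟩
  have hty16 : ty < 65536 := by
    rw [← hty]
    exact Mem.u16_lt _ _
  have r_ty : v.mem.readLE (g.e.reg .rdi + (iw + 160) * 2 + 4) 2 = ty := by
    rw [rd16 v.mem _ (g.f + 324 + 2 * i) (by u_omega), ← hty]
    rfl
  have w_eq : Mem.EqOn Vorbis.L.textLo Vorbis.L.textHi u₀.mem v.mem := hfr.code
  have hdf : v.flags .df = false := (show abiInv _ from hfr.inv).1
  have hmx : v.mxcsr &&& 0x1F80 = 0x1F80 := (show abiInv _ from hfr.inv).2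
  u_walk hcode [hμ.vendor, hiw] until [0x1167c3] span [Vorbis.L.textLo, Vorbis.L.textHi] side (v_side)
  case check_11678b =>
    -- the check of `f->residue_config`: a field of `*f` (OB1)
    have hun : ShadowUntouched v.mem s_11678b.mem := by v_untouched
    have hs : Site (g.Live A) (g.f + 456) 8 := hlate.bits.site_field hlate.env.live 456 8 (by omega) (by omega) rfl
    exact Vorbis.Spec.check_site hfr.shadow hun hs (by u_omega)
  case check_1167b3 =>
    -- the check of `f->residue_types[i]`: inside `*f` (OB1, R1)
    have hun : ShadowUntouched v.mem s_1167b3.mem := by v_untouched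
    have hres := hlate.own.cfg.residue (by omega)
    have hs : Site (g.Live A) (g.f + 324 + 2 * i) 2 :=
      ResidueOK.site_type hlate.env.live hlate.bits.OB1 hres.R1.2 hb.lt rfl
    exact Vorbis.Spec.check_site hfr.shadow hun hs (by u_omega)
  case side_nofault =>
    -- `idiv ecx`, `ecx = 2`: no #DE
    cases (idiv2 _).symm.trans hopt1
  · -- residue_types[i] ≠ 2: ebx = blocksize_1 / 2
    have hq : qr_116828 = ((Word.part Width.w32 (v.reg .r15)).sdiv 2#32, (Word.part Width.w32 (v.reg .r15)).srem 2#32) :=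
      Option.some.inj (hopt_116828.symm.trans (idiv2 _))
    subst hq
    dsimp only at w_rbx
    have hp : (Word.part Width.w32 (v.reg .r15)).toNat = bsize v.mem g.f 1 := by
      rw [Asan.part32_toNat, h15]
      omega
    refine mid_ok Lay hLay μ hμ u₀ hcode h4 g i v A9 A10 A hex hb s_11682c
      ⟨w_rip, w_rsp, (w_kept .rbp rfl).trans hv_rbp, w_kept .r13 rfl, w_kept .r15 rfl, ⟨_, w_mem⟩, w_eq, ?_, ?_⟩
      (iw <<< 5 + cw) w_r12 ?_ _ w_rbx ?_
    · rw [w_flags]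
      simp only [X86.User.df_setStatus]
      exact w_df_1167b3
    · rw [w_mxcsr]
      exact hmx
    · rw [hrdef, hcfg]
      u_omega
    · rw [sdiv2 _ (by omega), hp, hty, Res.actualEst_def, if_neg (by omega)]
  · -- residue_types[i] = 2: ebx = blocksize_1
    have hp : (Word.part Width.w32 (v.reg .r15)).toNat = bsize v.mem g.f 1 := by
      rw [Asan.part32_toNat, h15]
      omega
    refine mid_ok Lay hLay μ hμ u₀ hcode h4 g i v A9 A10 A hex hb s_1167c0
      ⟨w_rip, w_rsp, (w_kept .rbp rfl).trans hv_rbp, w_kept .r13 rfl, w_kept .r15 rfl, ⟨_, w_mem⟩, w_eq, ?_, ?_⟩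
      (iw <<< 5 + cw) w_r12 ?_ _ w_rbx ?_
    · rw [w_flags]
      simp only [X86.User.df_setStatus]
      exact w_df_1167b3
    · rw [w_mxcsr]
      exact hmx
    · rw [hrdef, hcfg]
      u_omega
    · rw [hp, hty, Res.actualEst_def, if_pos (by omega)]

/-- **Segment R18 from the pure fact at the exit**: the four walks (head, mid, dv, tail) composed. -/
theorem seg_of_exit (Lay : Layout) (hLay : Lay.hi = 0x1000000) (μ : Microarch) (hμ : UserX.MicroOK μ) (u₀ : State)
    (hcode : HasCodeNat Lay u₀ Vorbis.L.start_decoder.entry Vorbis.Code.code_start_decoder.nat Vorbis.L.start_decoder.size)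
    (h8 : Asan.SmallCheck Lay μ Vorbis.WayInv (Vorbis.CodeOK u₀) [.rax, .rcx, .rdx] 8 Vorbis.L.__asan_load8_noabort.entry)
    (h2 : Asan.SmallCheck Lay μ Vorbis.WayInv (Vorbis.CodeOK u₀) [.rax, .rcx, .rdx] 2 Vorbis.L.__asan_load2_noabort.entry)
    (h4 : Asan.SmallCheck Lay μ Vorbis.WayInv (Vorbis.CodeOK u₀) [.rax, .rcx, .rdx] 4 Vorbis.L.__asan_load4_noabort.entry)
    (hex : ExitOK u₀) : Vorbis.Spec.StartDecoder.SegR18 Lay μ u₀ := by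
  intro g i v hat
  obtain ⟨A9, A10, A, hb⟩ := hat
  exact head_ok Lay hLay μ hμ u₀ hcode h8 h2 h4 g i v A9 A10 A hex hb

end Vorbis.Spec.start_decoder_R18
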